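-- pv_equiv track=rewrite | github.com/Trish-K/PythonProblems | labs109.py | domino_cycle
-- ===== SOURCE A (Python) =====
-- def domino_cycle(tiles):
--     if len(tiles) <= 1:
--         return tiles == [] or tiles[0][0] == tiles[0][1]
--     elif tiles[0][0] == tiles[len(tiles)-1][1]:
--         for count in range(len(tiles)-1):
--             if tiles[count][1] != tiles[count+1][0]:
--                 return False
--         return True
--     return False
-- ===== SOURCE B (Python) =====
-- def domino_cycle(tiles):
--     firsts = [t[0] for t in tiles]
--     seconds = [t[1] for t in tiles]
--     return seconds == firsts[1:] + firsts[:1]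
-- ===== Notes on version B (the rewrite author's own statement) =====
-- stated objective: simpler
-- what changed: Replaces the length<=1 special case, wraparound check and index loop by one whole-list comparison: the seconds column must equal the firsts column rotated by one.
import Mathlib
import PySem

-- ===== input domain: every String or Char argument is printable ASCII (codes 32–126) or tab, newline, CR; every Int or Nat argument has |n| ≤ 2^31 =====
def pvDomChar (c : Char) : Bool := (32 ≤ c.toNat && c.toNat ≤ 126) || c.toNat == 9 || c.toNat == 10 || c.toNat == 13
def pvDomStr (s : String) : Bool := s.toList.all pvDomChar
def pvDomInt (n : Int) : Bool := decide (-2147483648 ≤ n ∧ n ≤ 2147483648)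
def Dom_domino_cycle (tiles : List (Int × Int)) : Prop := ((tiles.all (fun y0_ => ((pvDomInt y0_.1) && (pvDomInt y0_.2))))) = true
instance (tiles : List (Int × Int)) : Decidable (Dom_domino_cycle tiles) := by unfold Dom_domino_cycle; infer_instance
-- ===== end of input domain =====

-- B replaces A's length<=1 special case, wraparound check and index loop by a single
-- whole-list comparison (seconds column = firsts column rotated by one); objective: simpler.


-- ===== PORT A =====
def domino_cycle (tiles : List (Int × Int)) : Bool :=
  if tiles.length ≤ 1 then
    tiles == [] || (PySem.List.pyGetD tiles 0 ((0 : Int), (0 : Int))).1 == (PySem.List.pyGetD tiles 0 ((0 : Int), (0 : Int))).2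
  else if (PySem.List.pyGetD tiles 0 ((0 : Int), (0 : Int))).1
        == (PySem.List.pyGetD tiles ((tiles.length : Int) - 1) ((0 : Int), (0 : Int))).2 then
    (PySem.List.pyRange 0 ((tiles.length : Int) - 1) 1).all
      (fun c => (PySem.List.pyGetD tiles c ((0 : Int), (0 : Int))).2
             == (PySem.List.pyGetD tiles (c + 1) ((0 : Int), (0 : Int))).1)
  else false

-- ===== PORT B =====
def domino_cycle_alt (tiles : List (Int × Int)) : Bool :=
  let firsts := tiles.map Prod.fst
  let seconds := tiles.map Prod.snd
  seconds == PySem.List.slice firsts (some 1) none ++ PySem.List.slice firsts none (some 1)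

-- ===== PRECONDITION & SPEC =====
def Spec_domino_cycle (tiles : List (Int × Int)) (out : Bool) : Prop := out = domino_cycle_alt tiles
instance (tiles : List (Int × Int)) (out : Bool) : Decidable (Spec_domino_cycle tiles out) := by unfold Spec_domino_cycle; infer_instance

-- ===== CLAIM (what is proved, stated in full; the proofs are below) =====
def Claim_equal_domino_cycle : Prop := ∀ (tiles : List (Int × Int)), Dom_domino_cycle tiles → Spec_domino_cycle tiles (domino_cycle tiles)

-- ===== LEMMAS AND PROOFS =====

-- structural chain predicate: tiles x::rest link consecutively and the last second equals a
def pvChain (a : Int) : (Int × Int) → List (Int × Int) → Bool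
  | x, [] => x.2 == a
  | x, y :: ys => (x.2 == y.1) && pvChain a y ys

-- adjacency only (A's inner loop, structurally)
def pvAdj : List (Int × Int) → Bool
  | [] => true
  | [_] => true
  | x :: y :: ys => (x.2 == y.1) && pvAdj (y :: ys)

lemma pvChain_eq_B (rest : List (Int × Int)) : ∀ (x : Int × Int) (a : Int),
    ((List.map Prod.snd (x :: rest)) == List.map Prod.fst rest ++ [a]) = pvChain a x rest := by
  induction rest with
  | nil => intro x a; simp [pvChain]
  | cons y ys ih =>
    intro x a
    simp only [List.map_cons, List.cons_append, pvChain]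
    rw [← ih y a]
    simp

lemma pvChain_eq_adj_last (rest : List (Int × Int)) : ∀ (x : Int × Int) (a : Int),
    pvChain a x rest = (pvAdj (x :: rest) && ((rest.getLastD x).2 == a)) := by
  induction rest with
  | nil => intro x a; simp [pvChain, pvAdj]
  | cons y ys ih =>
    intro x a
    simp only [pvChain, pvAdj, ih y a, List.getLastD_cons, Bool.and_assoc]

lemma pvAllRangeSucc (n : Nat) (g : Nat → Bool) :
    (List.range (n+1)).all g = (g 0 && (List.range n).all (fun k => g (k+1))) := by
  rw [List.range_succ_eq_map, List.all_cons, List.all_map]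
  rfl

lemma pvLoop_eq_adj (xs : List (Int × Int)) (hxs : xs ≠ []) :
    (List.range (xs.length - 1)).all
      (fun k => (xs.getD k ((0:Int),(0:Int))).2 == (xs.getD (k+1) ((0:Int),(0:Int))).1)
      = pvAdj xs := by
  induction xs with
  | nil => simp at hxs
  | cons x xs ih =>
    match xs with
    | [] => simp [pvAdj]
    | y :: ys =>
      have h : (x :: y :: ys).length - 1 = ys.length + 1 := by simp
      rw [h, pvAllRangeSucc, pvAdj]
      refine congrArg₂ (fun a b => a && b) ?_ ?_
      · simp
      · rw [← ih (by simp)]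
        have h2 : (y :: ys).length - 1 = ys.length := by simp
        rw [h2]
        refine List.all_congr rfl (fun k => ?_)
        simp

lemma pvLoop_int_eq (xs : List (Int × Int)) :
    ((PySem.List.pyRange 0 ((xs.length : Int) - 1) 1).all
      (fun c => (PySem.List.pyGetD xs c ((0:Int),(0:Int))).2
             == (PySem.List.pyGetD xs (c + 1) ((0:Int),(0:Int))).1))
    = (List.range (xs.length - 1)).all
      (fun k => (xs.getD k ((0:Int),(0:Int))).2 == (xs.getD (k+1) ((0:Int),(0:Int))).1) := by
  rw [PySem.List.pyRange_one]
  have hcast : ((xs.length : Int) - 1 - 0).toNat = xs.length - 1 := by omega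
  rw [hcast, List.all_map]
  refine List.all_congr rfl (fun k => ?_)
  have h1 : (0 : Int) + (k : Int) = ((k : Nat) : Int) := by omega
  have h3 : ((k : Int) + 1) = (((k + 1 : Nat)) : Int) := by push_cast; ring
  simp only [Function.comp, h1, h3, PySem.List.pyGetD_natCast]

lemma pvAlt_cons (x : Int × Int) (rest : List (Int × Int)) :
    domino_cycle_alt (x :: rest) = pvChain x.1 x rest := by
  show (List.map Prod.snd (x :: rest)
      == PySem.List.slice (List.map Prod.fst (x :: rest)) (some 1) none
       ++ PySem.List.slice (List.map Prod.fst (x :: rest)) none (some 1)) = _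
  rw [← pvChain_eq_B, PySem.List.slice_from_one, PySem.List.slice_to _ (by omega : (0:Int) ≤ 1)]
  simp

lemma pv_main (tiles : List (Int × Int)) : domino_cycle tiles = domino_cycle_alt tiles := by
  match tiles with
  | [] => rfl
  | [x] =>
    rw [pvAlt_cons]
    simp only [domino_cycle, pvChain, PySem.List.pyGetD_zero_cons, List.length_cons,
      List.length_nil, if_pos (by omega : 0 + 1 ≤ 1)]
    simp [Bool.beq_comm]
  | x :: y :: ys =>
    rw [pvAlt_cons]
    unfold domino_cycle
    have hlen : ¬ (x :: y :: ys).length ≤ 1 := by simp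
    rw [if_neg hlen]
    have hlast : PySem.List.pyGetD (x :: y :: ys) (((x :: y :: ys).length : Int) - 1) ((0:Int),(0:Int))
        = (y :: ys).getLastD x := by
      rw [PySem.List.pyGetD_eq_getElem _ _ (by omega) (by omega)]
      rw [← List.getLast_eq_getLastD (by simp : x :: y :: ys ≠ []), List.getLast_eq_getElem]
      congr 1
      omega
    rw [hlast, PySem.List.pyGetD_zero_cons,
        pvLoop_int_eq, pvLoop_eq_adj _ (by simp),
        pvChain_eq_adj_last]
    by_cases h : x.1 = ((y :: ys).getLastD x).2
    · rw [if_pos (by simp [h])]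
      simp [h]
    · rw [if_neg (by simpa using h)]
      rw [eq_comm, Bool.and_eq_false_iff]
      right
      simp only [List.getLastD_cons, beq_eq_false_iff_ne]
      exact fun he => h ((List.getLastD_cons ▸ he).symm)

-- ===== VERDICT (by name: the statement is the Claim_ definition above) =====
theorem domino_cycle_spec : Claim_equal_domino_cycle := by
  intro tiles _
  unfold Spec_domino_cycle
  exact pv_main tiles
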